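-- pv_equiv track=rewrite | github.com/EDAII/Lista5_2018-02-Allan_Filipe | TrabalhosEDA5/Trabalho05/views.py | add_coins_count
-- ===== SOURCE A (Python) =====
-- def add_coins_count(current_vector, change_list_results):
--     coin_1 = 0
--     coin_5 = 0
--     coin_10 = 0
--     coin_25 = 0
--     coin_50 = 0
--     coin_100 = 0
--
--     for coin in change_list_results:
--         if coin == 1:
--             coin_1 += 1
--         elif coin == 5:
--             coin_5 += 1
--         elif coin == 10:
--             coin_10 += 1
--         elif coin == 25:
--             coin_25 += 1
--         elif coin == 50:
--             coin_50 += 1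
--         elif coin == 100:
--             coin_100 += 1
--         else:
--             # Nothing to do.
--             pass
--
--     current_vector.append(coin_1)
--     current_vector.append(coin_5)
--     current_vector.append(coin_10)
--     current_vector.append(coin_25)
--     current_vector.append(coin_50)
--     current_vector.append(coin_100)
--
--     return current_vector
-- ===== SOURCE B (Python) =====
-- def add_coins_count(current_vector, change_list_results):
--     current_vector.extend(change_list_results.count(c) for c in (1, 5, 10, 25, 50, 100))
--     return current_vector
-- ===== Notes on version B (the rewrite author's own statement) =====
-- stated objective: simpler
-- what changed: Replaces the six named counters and the elif-chain loop with list.count for each of the six denominations, extended onto the vector in the same order.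
import Mathlib
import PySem

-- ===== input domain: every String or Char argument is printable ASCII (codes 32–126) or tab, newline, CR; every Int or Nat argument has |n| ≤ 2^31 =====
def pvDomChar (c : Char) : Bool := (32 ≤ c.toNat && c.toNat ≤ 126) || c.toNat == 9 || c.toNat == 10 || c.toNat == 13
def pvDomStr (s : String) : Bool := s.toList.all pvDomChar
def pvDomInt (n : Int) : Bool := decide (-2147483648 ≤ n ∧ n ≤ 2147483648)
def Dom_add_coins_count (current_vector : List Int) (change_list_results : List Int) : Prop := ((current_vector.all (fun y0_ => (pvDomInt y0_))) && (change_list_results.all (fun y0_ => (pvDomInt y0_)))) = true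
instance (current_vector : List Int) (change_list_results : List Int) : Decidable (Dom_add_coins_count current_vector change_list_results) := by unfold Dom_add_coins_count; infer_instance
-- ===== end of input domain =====

-- B replaces the six named counters and the elif-chain with list.count per denomination (simpler).
-- A mutates current_vector in place (append) and B does too (extend); the equivalence proved here is about the return value.
-- ===== PORT A =====
def add_coins_count (current_vector : List Int) (change_list_results : List Int) : List Int :=
  let s := change_list_results.foldl
    (fun (s : Int × Int × Int × Int × Int × Int) (coin : Int) =>
      let (c1, c5, c10, c25, c50, c100) := s
      if coin == 1 then (c1 + 1, c5, c10, c25, c50, c100)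
      else if coin == 5 then (c1, c5 + 1, c10, c25, c50, c100)
      else if coin == 10 then (c1, c5, c10 + 1, c25, c50, c100)
      else if coin == 25 then (c1, c5, c10, c25 + 1, c50, c100)
      else if coin == 50 then (c1, c5, c10, c25, c50 + 1, c100)
      else if coin == 100 then (c1, c5, c10, c25, c50, c100 + 1)
      else (c1, c5, c10, c25, c50, c100))
    (0, 0, 0, 0, 0, 0)
  current_vector ++ [s.1, s.2.1, s.2.2.1, s.2.2.2.1, s.2.2.2.2.1, s.2.2.2.2.2]

-- ===== PORT B =====
def add_coins_count_alt (current_vector : List Int) (change_list_results : List Int) : List Int :=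
  current_vector ++ ([(1 : Int), 5, 10, 25, 50, 100].map
    (fun c => (PySem.List.count change_list_results c : Int)))

-- ===== PRECONDITION & SPEC =====
def Spec_add_coins_count (current_vector : List Int) (change_list_results : List Int) (out : List Int) : Prop := out = add_coins_count_alt current_vector change_list_results
instance (current_vector : List Int) (change_list_results : List Int) (out : List Int) : Decidable (Spec_add_coins_count current_vector change_list_results out) := by unfold Spec_add_coins_count; infer_instance

-- ===== CLAIM (what is proved, stated in full; the proofs are below) =====
def Claim_equal_add_coins_count : Prop := ∀ (current_vector : List Int) (change_list_results : List Int), Dom_add_coins_count current_vector change_list_results → Spec_add_coins_count current_vector change_list_results (add_coins_count current_vector change_list_results)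

-- ===== LEMMAS AND PROOFS =====
set_option maxHeartbeats 1000000 in
theorem pvLoop_counts (l : List Int) (s : Int × Int × Int × Int × Int × Int) :
    l.foldl
      (fun (s : Int × Int × Int × Int × Int × Int) (coin : Int) =>
        let (c1, c5, c10, c25, c50, c100) := s
        if coin == 1 then (c1 + 1, c5, c10, c25, c50, c100)
        else if coin == 5 then (c1, c5 + 1, c10, c25, c50, c100)
        else if coin == 10 then (c1, c5, c10 + 1, c25, c50, c100)
        else if coin == 25 then (c1, c5, c10, c25 + 1, c50, c100)
        else if coin == 50 then (c1, c5, c10, c25, c50 + 1, c100)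
        else if coin == 100 then (c1, c5, c10, c25, c50, c100 + 1)
        else (c1, c5, c10, c25, c50, c100))
      s
    = (s.1 + l.count 1, s.2.1 + l.count 5, s.2.2.1 + l.count 10,
       s.2.2.2.1 + l.count 25, s.2.2.2.2.1 + l.count 50, s.2.2.2.2.2 + l.count 100) := by
  induction l generalizing s with
  | nil => simp
  | cons x t ih =>
    obtain ⟨c1, c5, c10, c25, c50, c100⟩ := s
    rw [List.foldl_cons, ih]
    clear ih
    simp only [List.count_cons, beq_iff_eq]
    split_ifs <;> first | (exfalso; omega) | (push_cast; ring)

-- ===== VERDICT (by name: the statement is the Claim_ definition above) =====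
theorem add_coins_count_spec : Claim_equal_add_coins_count := by
  intro cv cl _
  unfold Spec_add_coins_count add_coins_count add_coins_count_alt
  rw [pvLoop_counts]
  simp [PySem.List.count]
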